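-- pv_equiv track=rewrite | github.com/ShahbazianR/VRP | ALS/model_functions.py | routes_decompose
-- ===== SOURCE A (Python) =====
-- def routes_decompose(solution, n_depots):
--     depots = list(range(n_depots))
--     routes = []
--     route = [solution[0]]
--     for node_ind in range(1, len(solution)):
--         node = solution[node_ind]
--         if node in depots:
--             if len(route):
--                 route.append(node)
--                 routes.append(route)
--                 route = []
--             else:
--                 route.append(node)
--         else:
--             route.append(node)
--
--     return routes
-- ===== SOURCE B (Python) =====
-- def routes_decompose(solution, n_depots):
--     routes = []
--     rest = solution
--     while rest:
--         head, tail = rest[0], rest[1:]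
--         j = next((k for k, node in enumerate(tail) if 0 <= node < n_depots), None)
--         if j is None:
--             break
--         routes.append([head] + tail[:j + 1])
--         rest = tail[j + 1:]
--     return routes
-- ===== Notes on version B (the rewrite author's own statement) =====
-- stated objective: faster
-- what changed: B replaces A's single indexed pass with a grown route accumulator and a depot membership list by an outer loop over remaining suffixes: each iteration searches the tail for the first in-range depot (an O(1) range test instead of A's O(n_depots) list scan), emits that whole segment as one slice, and restarts on the remainder.
import Mathlib
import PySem

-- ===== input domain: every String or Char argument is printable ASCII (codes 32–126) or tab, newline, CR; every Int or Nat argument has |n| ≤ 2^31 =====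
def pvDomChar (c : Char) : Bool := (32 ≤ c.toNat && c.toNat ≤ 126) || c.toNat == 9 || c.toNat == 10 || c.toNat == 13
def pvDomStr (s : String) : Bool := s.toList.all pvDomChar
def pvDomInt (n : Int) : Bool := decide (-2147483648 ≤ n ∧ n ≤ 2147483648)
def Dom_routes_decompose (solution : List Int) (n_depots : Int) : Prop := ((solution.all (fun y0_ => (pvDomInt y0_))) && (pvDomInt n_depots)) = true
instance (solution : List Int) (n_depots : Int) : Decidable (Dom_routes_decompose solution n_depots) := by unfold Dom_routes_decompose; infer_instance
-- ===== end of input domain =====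

-- B rewrites A's single indexed pass with a grown route accumulator as an outer
-- loop over remaining suffixes (inner search for the first depot, slice it off).

-- ===== PORT A =====
-- A's loop body: append node to route; when node is a depot and route nonempty, close the route.
def pvStepA (solution : List Int) (depots : List Int)
    (st : List (List Int) × List Int) (node_ind : Int) : List (List Int) × List Int :=
  let node := PySem.List.pyGetD solution node_ind 0
  if node ∈ depots then
    if st.2.length ≠ 0 then (st.1 ++ [st.2 ++ [node]], [])
    else (st.1, st.2 ++ [node])
  else (st.1, st.2 ++ [node])

def routes_decompose (solution : List Int) (n_depots : Int) : List (List Int) :=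
  let depots := PySem.List.pyRange 0 n_depots 1
  -- solution[0]: Pre_ guarantees solution ≠ [], so the default is never used
  let st := (PySem.List.pyRange 1 (solution.length : Int) 1).foldl
      (pvStepA solution depots) ([], [PySem.List.pyGetD solution 0 0])
  st.1

-- ===== PORT B =====
-- B's inner search: index of the first in-range depot of the tail (Python's next(...- or None)
def pvFindDep (n_depots : Int) : List Int → Option Nat
  | [] => none
  | x :: xs => if 0 ≤ x ∧ x < n_depots then some 0 else (pvFindDep n_depots xs).map (· + 1)

-- B's outer while-loop over the remaining suffix, as tail-structural recursion
-- (fuel = initial length only makes the recursion structural; it is never exhausted)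
def pvGo (n_depots : Int) : Nat → List Int → List (List Int)
  | 0, _ => []
  | _ + 1, [] => []
  | fuel + 1, head :: tail =>
    match pvFindDep n_depots tail with
    | none => []
    | some j => (head :: tail.take (j + 1)) :: pvGo n_depots fuel (tail.drop (j + 1))

def routes_decompose_alt (solution : List Int) (n_depots : Int) : List (List Int) :=
  pvGo n_depots solution.length solution

-- ===== PRECONDITION & SPEC =====
-- Pre_ excludes only the empty list, on which A raises IndexError at solution[0].
def Pre_routes_decompose (solution : List Int) (n_depots : Int) : Prop := solution ≠ []
instance (solution : List Int) (n_depots : Int) : Decidable (Pre_routes_decompose solution n_depots) := by unfold Pre_routes_decompose; infer_instance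
def pvWitness_routes_decompose : List Int × Int := ([0, 3, 2, 0, 1, 4, 0], 2)

def Spec_routes_decompose (solution : List Int) (n_depots : Int) (out : List (List Int)) : Prop := out = routes_decompose_alt solution n_depots
instance (solution : List Int) (n_depots : Int) (out : List (List Int)) : Decidable (Spec_routes_decompose solution n_depots out) := by unfold Spec_routes_decompose; infer_instance

-- ===== CLAIM (what is proved, stated in full; the proofs are below) =====
def Claim_equal_routes_decompose : Prop := ∀ (solution : List Int) (n_depots : Int), Dom_routes_decompose solution n_depots → Pre_routes_decompose solution n_depots → Spec_routes_decompose solution n_depots (routes_decompose solution n_depots)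

-- ===== LEMMAS AND PROOFS =====

-- A's loop, freed from its indices: process the remaining suffix with the current open route
def pvGA (nd : Int) : List Int → List Int → List (List Int)
  | [], _ => []
  | x :: xs, route =>
    if 0 ≤ x ∧ x < nd then
      if route ≠ [] then (route ++ [x]) :: pvGA nd xs []
      else pvGA nd xs (route ++ [x])
    else pvGA nd xs (route ++ [x])

-- L1: A's indexed fold from position j computes pvGA on the suffix sol.drop j
lemma pv_foldA_eq_gA (sol : List Int) (nd : Int) :
    ∀ (k j : Nat) (R : List (List Int)) (route : List Int),
      j + k = sol.length →
      ((PySem.List.pyRange (j : Int) (sol.length : Int) 1).foldl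
          (pvStepA sol (PySem.List.pyRange 0 nd 1)) (R, route)).1
      = R ++ pvGA nd (sol.drop j) route := by
  intro k
  induction k with
  | zero =>
    intro j R route hj
    rw [show PySem.List.pyRange (j : Int) (sol.length : Int) 1 = [] from
      PySem.List.pyRange_one_eq_nil (by omega)]
    rw [show sol.drop j = [] from List.drop_eq_nil_of_le (by omega)]
    simp [pvGA]
  | succ k ih =>
    intro j R route hj
    have hjl : j < sol.length := by omega
    rw [show PySem.List.pyRange (j : Int) (sol.length : Int) 1
          = (j : Int) :: PySem.List.pyRange ((j : Int) + 1) (sol.length : Int) 1 from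
      PySem.List.pyRange_one_cons (by exact_mod_cast hjl)]
    simp only [List.foldl_cons]
    have hnode : PySem.List.pyGetD sol (j : Int) 0 = sol[j] := by
      simp [PySem.List.pyGetD_natCast, List.getD_eq_getElem?_getD,
            List.getElem?_eq_getElem hjl]
    have hdropj : sol.drop j = sol[j] :: sol.drop (j + 1) :=
      List.drop_eq_getElem_cons hjl
    have hcast : ((j : Int) + 1) = ((j + 1 : Nat) : Int) := by push_cast; ring
    by_cases hdep : (0 ≤ sol[j] ∧ sol[j] < nd)
    · by_cases hr : route = []
      · -- depot, empty route: both just extend the route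
        subst hr
        have hA : pvStepA sol (PySem.List.pyRange 0 nd 1) (R, []) ((j : Int))
            = (R, [sol[j]]) := by
          simp [pvStepA, hnode, PySem.List.mem_pyRange_one.mpr hdep]
        rw [hA, hcast, ih (j + 1) R [sol[j]] (by omega), hdropj]
        simp [pvGA, hdep]
      · -- depot, nonempty route: close the route
        have hA : pvStepA sol (PySem.List.pyRange 0 nd 1) (R, route) ((j : Int))
            = (R ++ [route ++ [sol[j]]], []) := by
          have hlen : route.length ≠ 0 := by simpa using hr
          simp only [pvStepA]
          rw [hnode, if_pos (PySem.List.mem_pyRange_one.mpr hdep), if_pos hlen]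
        rw [hA, hcast, ih (j + 1) _ [] (by omega), hdropj]
        simp [pvGA, hdep, hr]
    · -- not a depot: append and move on
      have hA : pvStepA sol (PySem.List.pyRange 0 nd 1) (R, route) ((j : Int))
          = (R, route ++ [sol[j]]) := by
        simp only [pvStepA]
        rw [hnode, if_neg (fun h => hdep (PySem.List.mem_pyRange_one.mp h))]
      rw [hA, hcast, ih (j + 1) R (route ++ [sol[j]]) (by omega), hdropj]
      simp [pvGA, hdep]

-- L2: scanning with a nonempty open route is one first-depot search plus a restart
lemma pv_gA_scan (nd : Int) :
    ∀ (rest r : List Int), r ≠ [] →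
      pvGA nd rest r
      = match pvFindDep nd rest with
        | none => []
        | some j => (r ++ rest.take (j + 1)) :: pvGA nd (rest.drop (j + 1)) [] := by
  intro rest
  induction rest with
  | nil => intro r _; simp [pvGA, pvFindDep]
  | cons x xs ih =>
    intro r hr
    by_cases hx : (0 ≤ x ∧ x < nd)
    · simp [pvGA, pvFindDep, hx, hr]
    · have hr' : r ++ [x] ≠ [] := by simp
      rw [show pvGA nd (x :: xs) r = pvGA nd xs (r ++ [x]) from by simp [pvGA, hx],
          ih (r ++ [x]) hr']
      rw [show pvFindDep nd (x :: xs) = (pvFindDep nd xs).map (· + 1) from by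
        simp [pvFindDep, hx]]
      cases pvFindDep nd xs with
      | none => simp
      | some j => simp

-- L3: with enough fuel, pvGo is pvGA started with an empty route
lemma pv_gA_eq_go (nd : Int) :
    ∀ (n : Nat) (l : List Int), l.length ≤ n → pvGA nd l [] = pvGo nd n l := by
  intro n
  induction n with
  | zero =>
    intro l hl
    rw [show l = [] from List.eq_nil_of_length_eq_zero (by omega)]
    simp [pvGA, pvGo]
  | succ m ih =>
    intro l hl
    cases l with
    | nil => simp [pvGA, pvGo]
    | cons y ys =>
      have h1 : pvGA nd (y :: ys) [] = pvGA nd ys [y] := by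
        by_cases hy : (0 ≤ y ∧ y < nd) <;> simp [pvGA, hy]
      rw [h1, pv_gA_scan nd ys [y] (by simp)]
      simp only [pvGo]
      cases pvFindDep nd ys with
      | none => simp
      | some j =>
        have : (ys.drop (j + 1)).length ≤ m := by
          simp only [List.length_drop]
          simp at hl
          omega
        simp [ih (ys.drop (j + 1)) this]

-- ===== VERDICT (by name: the statements are the Claim_ definitions above) =====
theorem routes_decompose_spec : Claim_equal_routes_decompose := by
  unfold Claim_equal_routes_decompose
  intro sol nd _ hpre
  unfold Spec_routes_decompose routes_decompose routes_decompose_alt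
  cases sol with
  | nil => exact absurd rfl hpre
  | cons a l =>
    have h0 : PySem.List.pyGetD (a :: l) (0 : Int) 0 = a := by
      simp [PySem.List.pyGetD_of_nonneg]
    simp only [h0]
    have hfold := pv_foldA_eq_gA (a :: l) nd (a :: l).length.pred 1 [] [a]
          (by simp [Nat.add_comm])
    simp only [Nat.cast_one] at hfold
    rw [hfold, ← pv_gA_eq_go nd (a :: l).length (a :: l) (le_refl _)]
    have : pvGA nd (a :: l) [] = pvGA nd l [a] := by
      by_cases hy : (0 ≤ a ∧ a < nd) <;> simp [pvGA, hy]
    simp [this]
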